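-- pv_equiv track=rewrite | github.com/ChaitanyaSaiV/dsa | graph/semesters_required.py | semesters_required
-- ===== SOURCE A (Python) =====
-- def semesters_required(num_courses, prereqs):
--   graph, courses = build_graph(prereqs)
--
--   completed = set()
--
--   sems = 0
--
--   while courses:
--     for prereqs in list(graph):
--       for prereq in list(graph[prereqs]):
--         if prereq in completed:
--           graph[prereqs].remove(prereq)
--
--         if len(graph[prereqs]) == 0:
--           del graph[prereqs]
--
--     current_sem = set()
--
--     for course in courses:
--       if course not in graph:
--         current_sem.add(course)
--
--     for current_sem_course in current_sem:
--       courses.remove(current_sem_course)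
--       completed.add(current_sem_course)
--
--     sems += 1
--
--   return sems
--
-- def build_graph(prereqs):
--   graph = {}
--   courses = set()
--   for prereq in prereqs:
--     a, b = prereq
--     if b not in graph:
--       graph[b] = []
--     if a not in courses:
--       courses.add(a)
--     if b not in courses:
--       courses.add(b)
--
--     graph[b].append(a)
--
--   return graph, courses
-- ===== SOURCE B (Python) =====
-- def semesters_required(num_courses, prereqs):
--   # Kahn's algorithm: level-by-level BFS over indegrees; each edge is touched once.
--   indeg = {}
--   adj = {}
--   for a, b in prereqs:
--     if a not in indeg:
--       indeg[a] = 0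
--     if b not in indeg:
--       indeg[b] = 0
--     if a not in adj:
--       adj[a] = []
--     adj[a].append(b)
--     indeg[b] += 1
--   frontier = [v for v in indeg if indeg[v] == 0]
--   sems = 0
--   while frontier:
--     sems += 1
--     nxt = []
--     for v in frontier:
--       for w in adj.get(v, []):
--         indeg[w] -= 1
--         if indeg[w] == 0:
--           nxt.append(w)
--     frontier = nxt
--   return sems
-- ===== Notes on version B (the rewrite author's own statement) =====
-- stated objective: alternative
-- what changed: A repeatedly rescans and rewrites the whole adjacency dict every semester (removing completed prerequisites one list.remove at a time); B runs Kahn's algorithm: indegrees are counted once and a level-by-level BFS frontier touches every edge exactly once (intended as faster, O(V+E) vs O(V*E); a timing run could not confirm a ratio because A exceeds its time budget on the larger generated inputs).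
import Mathlib
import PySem

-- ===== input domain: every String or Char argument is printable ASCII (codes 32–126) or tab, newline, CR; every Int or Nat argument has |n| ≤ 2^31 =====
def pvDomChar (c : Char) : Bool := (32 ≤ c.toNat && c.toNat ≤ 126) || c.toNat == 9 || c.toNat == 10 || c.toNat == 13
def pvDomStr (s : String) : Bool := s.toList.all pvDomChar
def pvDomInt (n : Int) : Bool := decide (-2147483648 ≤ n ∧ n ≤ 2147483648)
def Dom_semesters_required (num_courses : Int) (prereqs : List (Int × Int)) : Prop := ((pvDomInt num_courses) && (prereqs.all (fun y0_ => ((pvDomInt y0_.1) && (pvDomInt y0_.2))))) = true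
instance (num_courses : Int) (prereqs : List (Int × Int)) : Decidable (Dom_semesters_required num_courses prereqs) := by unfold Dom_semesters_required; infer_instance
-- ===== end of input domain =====

-- B replaces A's per-semester rescan-and-rewrite of the whole adjacency dict by Kahn's
-- level-by-level BFS over indegrees, which touches each edge once (objective: alternative;
-- intended as faster, but a timing run could not measure a ratio because A times out).
-- Both loop ports use a structural fuel argument purely as a totality device; on every
-- input admitted by Pre_ the fuel is never exhausted.

-- ===== PORT A =====
-- build_graph(prereqs): dict target ↦ list of its prerequisites, plus the set of courses
def pvBuildGraph (prereqs : List (Int × Int)) : PySem.Dict Int (List Int) × PySem.Set Int :=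
  prereqs.foldl (fun st p =>
    let graph := if st.1.contains p.2 then st.1 else st.1.insert p.2 []
    let courses := PySem.Set.add (PySem.Set.add st.2 p.1) p.2
    (graph.modify p.2 [] (· ++ [p.1]), courses))
    (PySem.Dict.empty, PySem.Set.empty)

-- body of 'for prereq in list(graph[prereqs])' for one key; the 'none' branch of remove?
-- (Python: ValueError) is unreachable, prereq is drawn from the snapshot of that very list
def pvPassKey (completed : PySem.Set Int) (key : Int)
    (g : PySem.Dict Int (List Int)) : PySem.Dict Int (List Int) :=
  (g.getD key []).foldl (fun g2 prereq =>
    let g3 := if PySem.Set.contains completed prereq then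
        (match PySem.List.remove? (g2.getD key []) prereq with
         | some l => g2.insert key l
         | none => g2)
      else g2
    if (g3.getD key []).length = 0 then g3.erase key else g3) g

-- 'for prereqs in list(graph): …' (the whole edge-removal pass of one while-iteration)
def pvPass (completed : PySem.Set Int) (g : PySem.Dict Int (List Int)) : PySem.Dict Int (List Int) :=
  g.keys.foldl (fun g key => pvPassKey completed key g) g

-- 'while courses: …'
def pvLoopA (fuel : Nat) (g : PySem.Dict Int (List Int))
    (courses completed : PySem.Set Int) (sems : Int) : Int :=
  match fuel with
  | 0 => sems
  | fuel + 1 =>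
    if courses = [] then sems
    else
      let g := pvPass completed g
      let currentSem : PySem.Set Int :=
        courses.foldl (fun s c => if g.contains c then s else PySem.Set.add s c) PySem.Set.empty
      let courses' := currentSem.foldl (fun cs c => PySem.Set.discard cs c) courses
      let completed' := currentSem.foldl (fun cp c => PySem.Set.add cp c) completed
      pvLoopA fuel g courses' completed' (sems + 1)

def semesters_required (num_courses : Int) (prereqs : List (Int × Int)) : Int :=
  let (g, courses) := pvBuildGraph prereqs
  pvLoopA courses.length g courses PySem.Set.empty 0

-- ===== PORT B =====
-- indegree and adjacency dicts, built in one pass over the edges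
def pvKahnInit (prereqs : List (Int × Int)) : PySem.Dict Int Int × PySem.Dict Int (List Int) :=
  prereqs.foldl (fun st p =>
    let indeg := if st.1.contains p.1 then st.1 else st.1.insert p.1 0
    let indeg := if indeg.contains p.2 then indeg else indeg.insert p.2 0
    let adj := if st.2.contains p.1 then st.2 else st.2.insert p.1 []
    let adj := adj.modify p.1 [] (· ++ [p.2])
    (indeg.modify p.2 0 (· + 1), adj))
    (PySem.Dict.empty, PySem.Dict.empty)

-- one while-iteration: decrement indegrees along the frontier's out-edges, collect 'nxt'
def pvKahnRound (adj : PySem.Dict Int (List Int)) (frontier : List Int)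
    (indeg : PySem.Dict Int Int) : PySem.Dict Int Int × List Int :=
  frontier.foldl (fun st v =>
    (adj.getD v []).foldl (fun st w =>
      let indeg := st.1.modify w 0 (· - 1)
      if indeg.getD w 0 = 0 then (indeg, st.2 ++ [w]) else (indeg, st.2)) st)
    (indeg, [])

-- 'while frontier: …'
def pvKahnLoop (adj : PySem.Dict Int (List Int)) :
    Nat → PySem.Dict Int Int → List Int → Int → Int
  | 0, _, _, sems => sems
  | fuel + 1, indeg, frontier, sems =>
    if frontier = [] then sems
    else
      let r := pvKahnRound adj frontier indeg
      pvKahnLoop adj fuel r.1 r.2 (sems + 1)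

def semesters_required_alt (num_courses : Int) (prereqs : List (Int × Int)) : Int :=
  let (indeg, adj) := pvKahnInit prereqs
  let frontier := indeg.keys.filter (fun v => indeg.getD v 0 == 0)
  pvKahnLoop adj indeg.size indeg frontier 0

-- ===== PRECONDITION & SPEC =====
-- the distinct courses mentioned by the edge list, in A's insertion order
def pvNodes (prereqs : List (Int × Int)) : List Int :=
  PySem.Set.ofList (prereqs.flatMap (fun p => [p.1, p.2]))

-- Pre_ excludes exactly the cyclic prerequisite graphs, on which the Python A loops forever
-- (its while-loop then makes no progress but still increments sems); stated as the textbook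
-- characterisation of acyclicity: every nonempty set of courses contains a course with no
-- prerequisite inside that set.
def Pre_semesters_required (num_courses : Int) (prereqs : List (Int × Int)) : Prop :=
  ∀ S ∈ (pvNodes prereqs).sublists, S ≠ [] → ∃ v ∈ S, ∀ p ∈ prereqs, p.2 = v → p.1 ∉ S

instance (num_courses : Int) (prereqs : List (Int × Int)) :
    Decidable (Pre_semesters_required num_courses prereqs) := by
  unfold Pre_semesters_required; infer_instance

def pvWitness_semesters_required : Int × (List (Int × Int)) := (3, [(0, 1), (1, 2), (0, 2)])

def Spec_semesters_required (num_courses : Int) (prereqs : List (Int × Int)) (out : Int) : Prop := out = semesters_required_alt num_courses prereqs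
instance (num_courses : Int) (prereqs : List (Int × Int)) (out : Int) : Decidable (Spec_semesters_required num_courses prereqs out) := by unfold Spec_semesters_required; infer_instance

-- ===== CLAIM (what is proved, stated in full; the proofs are below) =====
def Claim_equal_semesters_required : Prop := ∀ (num_courses : Int) (prereqs : List (Int × Int)), Dom_semesters_required num_courses prereqs → Pre_semesters_required num_courses prereqs → Spec_semesters_required num_courses prereqs (semesters_required num_courses prereqs)

-- ===== LEMMAS AND PROOFS =====

-- the (multi-)list of prerequisites of v, and of direct successors of v
def pvDeps (prereqs : List (Int × Int)) (v : Int) : List Int :=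
  (prereqs.filter (fun p => p.2 == v)).map (·.1)
def pvOuts (prereqs : List (Int × Int)) (v : Int) : List Int :=
  (prereqs.filter (fun p => p.1 == v)).map (·.2)

-- pvDone k v: v can be completed within the first k semesters
def pvDone (prereqs : List (Int × Int)) : Nat → Int → Bool
  | 0, _ => false
  | k + 1, v => (pvDeps prereqs v).all (fun a => pvDone prereqs k a)

-- remaining courses after k semesters
def pvRem (prereqs : List (Int × Int)) (k : Nat) : List Int :=
  (pvNodes prereqs).filter (fun v => !pvDone prereqs k v)

theorem pvDone_mono {prereqs k v} (h : pvDone prereqs k v = true) :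
    pvDone prereqs (k + 1) v = true := by
  induction k generalizing v with
  | zero => simp [pvDone] at h
  | succ k ih =>
    simp only [pvDone, List.all_eq_true] at h ⊢
    intro a ha
    have := ih (h a ha)
    simpa [pvDone, List.all_eq_true] using this

theorem pvDone_le {prereqs k m v} (hkm : k ≤ m) (h : pvDone prereqs k v = true) :
    pvDone prereqs m v = true := by
  induction hkm with
  | refl => exact h
  | step _ ih => exact pvDone_mono ih

theorem mem_pvNodes_src {prereqs : List (Int × Int)} {p} (hp : p ∈ prereqs) :
    p.1 ∈ pvNodes prereqs := by
  simp only [pvNodes, PySem.Set.mem_ofList, List.mem_flatMap]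
  exact ⟨p, hp, by simp⟩
theorem mem_pvNodes_tgt {prereqs : List (Int × Int)} {p} (hp : p ∈ prereqs) :
    p.2 ∈ pvNodes prereqs := by
  simp only [pvNodes, PySem.Set.mem_ofList, List.mem_flatMap]
  exact ⟨p, hp, by simp⟩
theorem mem_pvNodes_of_mem_pvDeps {prereqs v a} (h : a ∈ pvDeps prereqs v) :
    a ∈ pvNodes prereqs := by
  simp only [pvDeps, List.mem_map, List.mem_filter] at h
  obtain ⟨p, ⟨hp, -⟩, rfl⟩ := h
  exact mem_pvNodes_src hp
theorem nodup_pvNodes (prereqs : List (Int × Int)) : (pvNodes prereqs).Nodup :=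
  PySem.Set.nodup_ofList _

theorem pvRem_succ (prereqs : List (Int × Int)) (k : Nat) :
    pvRem prereqs (k + 1) = (pvRem prereqs k).filter (fun v => !pvDone prereqs (k + 1) v) := by
  simp only [pvRem, List.filter_filter]
  refine List.filter_congr (fun v _ => ?_)
  cases h1 : pvDone prereqs (k + 1) v with
  | true => simp [h1]
  | false =>
    have h0 : pvDone prereqs k v = false := by
      cases h0 : pvDone prereqs k v
      · rfl
      · exact absurd (pvDone_mono h0) (by simp [h1])
    simp [h0, h1]

-- under Pre_, while courses remain some remaining course completes next semester
theorem pvReady_exists {num_courses prereqs k} (hP : Pre_semesters_required num_courses prereqs)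
    (h : pvRem prereqs k ≠ []) :
    ∃ v ∈ pvRem prereqs k, pvDone prereqs (k + 1) v = true := by
  have hsub : pvRem prereqs k ∈ (pvNodes prereqs).sublists :=
    List.mem_sublists.2 (by unfold pvRem; exact List.filter_sublist)
  obtain ⟨v, hv, hnp⟩ := hP _ hsub h
  refine ⟨v, hv, ?_⟩
  simp only [pvDone, List.all_eq_true]
  intro a ha
  have haN : a ∈ pvNodes prereqs := mem_pvNodes_of_mem_pvDeps ha
  simp only [pvDeps, List.mem_map, List.mem_filter, beq_iff_eq] at ha
  obtain ⟨p, ⟨hp, hp2⟩, rfl⟩ := ha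
  have hnr : p.1 ∉ pvRem prereqs k := hnp p hp hp2
  simp only [pvRem, List.mem_filter, Bool.not_eq_eq_eq_not, Bool.not_true] at hnr
  cases hd : pvDone prereqs k p.1
  · exact absurd ⟨haN, by simp [hd]⟩ hnr
  · rfl

theorem pvProgress {num_courses prereqs k} (hP : Pre_semesters_required num_courses prereqs)
    (h : pvRem prereqs k ≠ []) :
    (pvRem prereqs (k + 1)).length < (pvRem prereqs k).length := by
  obtain ⟨v, hv, hvdone⟩ := pvReady_exists hP h
  rw [pvRem_succ]
  exact List.length_filter_lt_length_iff_exists.2 ⟨v, hv, by simp [hvdone]⟩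

theorem pvExistsEmpty {num_courses prereqs} (hP : Pre_semesters_required num_courses prereqs) :
    ∃ m, pvRem prereqs m = [] := by
  suffices h : ∀ n k, (pvRem prereqs k).length ≤ n → ∃ m, pvRem prereqs m = [] from
    h (pvRem prereqs 0).length 0 le_rfl
  intro n
  induction n with
  | zero => exact fun k hk => ⟨k, List.eq_nil_of_length_eq_zero (Nat.le_zero.1 hk)⟩
  | succ n ih =>
    intro k hk
    by_cases hne : pvRem prereqs k = []
    · exact ⟨k, hne⟩
    · exact ih (k + 1) (by have := pvProgress hP hne; omega)


-- the number of semesters: the least k after which no course remains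
def pvN {num_courses prereqs} (hP : Pre_semesters_required num_courses prereqs) : Nat :=
  Nat.find (pvExistsEmpty hP)

theorem pvRem_zero (prereqs : List (Int × Int)) : pvRem prereqs 0 = pvNodes prereqs := by
  simp [pvRem, pvDone]

theorem pvRem_empty_le {prereqs k m} (hkm : k ≤ m) (h : pvRem prereqs k = []) :
    pvRem prereqs m = [] := by
  induction hkm with
  | refl => exact h
  | step _ ih => rw [pvRem_succ, ih]; rfl

theorem pvRem_pvN {num_courses prereqs} (hP : Pre_semesters_required num_courses prereqs) :
    pvRem prereqs (pvN hP) = [] := Nat.find_spec (pvExistsEmpty hP)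

theorem pvRem_eq_nil_iff {num_courses prereqs} (hP : Pre_semesters_required num_courses prereqs)
    (k : Nat) : pvRem prereqs k = [] ↔ pvN hP ≤ k := by
  constructor
  · exact fun h => Nat.find_le h
  · exact fun h => pvRem_empty_le h (pvRem_pvN hP)

theorem pvN_le_add {num_courses prereqs} (hP : Pre_semesters_required num_courses prereqs) :
    ∀ k, pvN hP ≤ k + (pvRem prereqs k).length := by
  suffices h : ∀ n k, (pvRem prereqs k).length ≤ n → pvN hP ≤ k + (pvRem prereqs k).length from
    fun k => h _ k le_rfl
  intro n
  induction n with
  | zero =>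
    intro k hk
    have h0 : pvRem prereqs k = [] := List.eq_nil_of_length_eq_zero (by omega)
    have := (pvRem_eq_nil_iff hP k).1 h0
    omega
  | succ n ih =>
    intro k hk
    by_cases h : pvRem prereqs k = []
    · have := (pvRem_eq_nil_iff hP k).1 h; omega
    · have h1 := pvProgress hP h
      have h2 := ih (k + 1) (by omega)
      omega

theorem pvN_le_card {num_courses prereqs} (hP : Pre_semesters_required num_courses prereqs) :
    pvN hP ≤ (pvNodes prereqs).length := by
  have := pvN_le_add hP 0
  simpa [pvRem_zero] using this

-- ---- generic dict / list facts used by both sides ----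
theorem pvMapFst_filter {α β : Type} (q : α → Bool) (l : List (α × β)) :
    (l.filter (fun p => q p.1)).map (·.1) = (l.map (·.1)).filter q := by
  induction l with
  | nil => rfl
  | cons p l ih => by_cases h : q p.1 <;> simp [List.filter_cons, h, ih]

theorem pvGet?_erase_of_ne {κ ν : Type} [BEq κ] [LawfulBEq κ] (d : PySem.Dict κ ν) (k v : κ)
    (h : v ≠ k) : (d.erase k).get? v = d.get? v := by
  have hkv : (k == v) = false := by simp; exact Ne.symm h
  simp only [PySem.Dict.erase, PySem.Dict.get?]
  congr 1
  induction d.items with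
  | nil => rfl
  | cons p items ih =>
    by_cases hpk : p.1 = k
    · simp [List.filter_cons, hpk, List.find?_cons, hkv, ih]
    · have hb : (p.1 == k) = false := by simp [hpk]
      rw [List.filter_cons, if_pos (by simp [hb])]
      by_cases hpv : p.1 = v
      · rw [List.find?_cons_of_pos (by simp [hpv]), List.find?_cons_of_pos (by simp [hpv])]
      · rw [List.find?_cons_of_neg (by simp [hpv]), List.find?_cons_of_neg (by simp [hpv]), ih]

theorem pvGetD_erase_of_ne {κ ν : Type} [BEq κ] [LawfulBEq κ] (d : PySem.Dict κ ν) (k v : κ)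
    (h : v ≠ k) (dflt : ν) : (d.erase k).getD v dflt = d.getD v dflt := by
  simp only [PySem.Dict.getD, pvGet?_erase_of_ne d k v h]

theorem pvContains_erase_self {κ ν : Type} [BEq κ] [LawfulBEq κ] (d : PySem.Dict κ ν) (k : κ) :
    (d.erase k).contains k = false := by
  simp only [PySem.Dict.erase, PySem.Dict.contains, List.any_filter]
  simp only [List.any_eq_false]
  intro p _
  cases hpk : p.1 == k <;> simp [hpk]

theorem pvContains_erase_of_ne {κ ν : Type} [BEq κ] [LawfulBEq κ] (d : PySem.Dict κ ν) (k v : κ)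
    (h : v ≠ k) : (d.erase k).contains v = d.contains v := by
  rw [PySem.Dict.contains_eq_isSome_get?, PySem.Dict.contains_eq_isSome_get?,
    pvGet?_erase_of_ne d k v h]

theorem pvKeys_erase {κ ν : Type} [BEq κ] (d : PySem.Dict κ ν) (k : κ) :
    (d.erase k).keys = d.keys.filter (fun x => !x == k) := by
  simp only [PySem.Dict.erase, PySem.Dict.keys]
  exact pvMapFst_filter (fun x => !x == k) d.items

theorem pvNodup_keys_erase {κ ν : Type} [BEq κ] (d : PySem.Dict κ ν) (k : κ)
    (h : d.keys.Nodup) : (d.erase k).keys.Nodup := by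
  rw [pvKeys_erase]; exact h.filter _

theorem pvInsert_getD_self {κ ν : Type} [BEq κ] [LawfulBEq κ] (d : PySem.Dict κ ν) (k : κ)
    (dflt : ν) (hc : d.contains k = true) (hnd : d.keys.Nodup) :
    d.insert k (d.getD k dflt) = d := by
  apply PySem.Dict.ext
  rw [PySem.Dict.items_insert_of_contains d _ hc]
  conv_rhs => rw [← List.map_id d.items]
  refine List.map_congr_left (fun p hp => ?_)
  by_cases hpk : p.1 = k
  · subst hpk
    have hmem : (p.1, p.2) ∈ d.items := by rw [Prod.mk.eta]; exact hp
    have hgd := PySem.Dict.getD_of_mem_items d hmem hnd dflt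
    simp [hgd]
  · simp [hpk]

theorem pvRemove?_append_cons {α : Type} [BEq α] [LawfulBEq α] (pre rest : List α) (x : α)
    (h : x ∉ pre) : PySem.List.remove? (pre ++ x :: rest) x = some (pre ++ rest) := by
  induction pre with
  | nil => simp [PySem.List.remove?_cons_self]
  | cons a pre ih =>
    have ha : a ≠ x := fun hax => h (by simp [hax])
    rw [List.cons_append, PySem.List.remove?_cons_of_ne _ ha,
      ih (fun hx => h (by simp [hx]))]
    rfl

theorem pvFoldl_flatMap {α β σ : Type} (l : List α) (g : α → List β) (f : σ → β → σ) (st : σ) :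
    l.foldl (fun st v => (g v).foldl f st) st = (l.flatMap g).foldl f st := by
  induction l generalizing st with
  | nil => rfl
  | cons v l ih => simp [List.flatMap_cons, List.foldl_append, ih]

theorem pvCountP_or_disjoint {α : Type} (l : List α) (p q : α → Bool)
    (h : ∀ x ∈ l, ¬(p x = true ∧ q x = true)) :
    l.countP (fun x => p x || q x) = l.countP p + l.countP q := by
  induction l with
  | nil => rfl
  | cons a l ih =>
    have hal := ih (fun x hx => h x (by simp [hx]))
    have ha := h a (by simp)
    cases hpa : p a <;> cases hqa : q a
    · simp [List.countP_cons, hpa, hqa, hal]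
    · simp [List.countP_cons, hpa, hqa, hal]; omega
    · simp [List.countP_cons, hpa, hqa, hal]; omega
    · exact absurd ⟨hpa, hqa⟩ ha

theorem pvFoldl_discard {α : Type} [BEq α] [LawfulBEq α] (cs s : List α) :
    cs.foldl (fun acc c => PySem.Set.discard acc c) s = s.filter (fun y => !cs.contains y) := by
  induction cs generalizing s with
  | nil => simp
  | cons c cs ih =>
    rw [List.foldl_cons, ih]
    show (PySem.Set.discard s c).filter _ = _
    simp only [PySem.Set.discard, List.filter_filter]
    refine List.filter_congr (fun y _ => ?_)
    by_cases hyc : y = c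
    · simp [hyc]
    · simp [hyc]

-- ---- level-collapse facts ----
theorem pvFilter_level {prereqs} {j k : Nat} (hjk : j ≤ k) (l : List Int) :
    (l.filter (fun a => !pvDone prereqs j a)).filter (fun a => !pvDone prereqs k a)
      = l.filter (fun a => !pvDone prereqs k a) := by
  rw [List.filter_filter]
  refine List.filter_congr (fun a _ => ?_)
  cases hk : pvDone prereqs k a
  · cases hj : pvDone prereqs j a
    · simp
    · exact absurd (pvDone_le hjk hj) (by simp [hk])
  · simp

-- the courses completable in semester k+1 but not earlier
def pvFrInv (prereqs : List (Int × Int)) (k : Nat) (fr : List Int) : Prop :=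
  fr.Nodup ∧ ∀ v, v ∈ fr ↔ v ∈ pvNodes prereqs ∧ pvDone prereqs (k + 1) v = true ∧ pvDone prereqs k v = false

theorem pvFr_empty_iff {num_courses prereqs} (hP : Pre_semesters_required num_courses prereqs)
    {k fr} (hfr : pvFrInv prereqs k fr) : fr = [] ↔ pvN hP ≤ k := by
  obtain ⟨-, hmem⟩ := hfr
  constructor
  · intro hnil
    by_contra hlt
    have hne : pvRem prereqs k ≠ [] := fun h => hlt ((pvRem_eq_nil_iff hP k).1 h)
    obtain ⟨v, hv, hvdone⟩ := pvReady_exists hP hne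
    simp only [pvRem, List.mem_filter, Bool.not_eq_eq_eq_not, Bool.not_true] at hv
    have hvfr : v ∈ fr := (hmem v).2 ⟨hv.1, hvdone, by simpa using hv.2⟩
    rw [hnil] at hvfr
    exact absurd hvfr List.not_mem_nil
  · intro hle
    have hnil := (pvRem_eq_nil_iff hP k).2 hle
    refine List.eq_nil_iff_forall_not_mem.2 (fun v hv => ?_)
    obtain ⟨hvN, -, hvk⟩ := (hmem v).1 hv
    have hvr : v ∈ pvRem prereqs k := by
      simp [pvRem, List.mem_filter, hvN, hvk]
    rw [hnil] at hvr
    exact absurd hvr List.not_mem_nil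

-- ---- B side ----
def pvBase (prereqs : List (Int × Int)) (k : Nat) (w : Int) : Nat :=
  ((pvDeps prereqs w).filter (fun a => !pvDone prereqs k a)).length

theorem pvGetD_insert_if {κ ν : Type} [BEq κ] [LawfulBEq κ] [DecidableEq κ]
    (d : PySem.Dict κ ν) (a w : κ) (dflt : ν) :
    (if d.contains a then d else d.insert a dflt).getD w dflt = d.getD w dflt := by
  by_cases h : d.contains a = true
  · simp [h]
  · have hf : d.contains a = false := by simpa using h
    rw [if_neg (by simp [hf]), PySem.Dict.getD_insert]
    by_cases hw : w = a
    · rw [if_pos hw, hw, PySem.Dict.getD_of_not_contains d dflt hf]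
    · rw [if_neg hw]

theorem pvKeys_insert_if {κ ν : Type} [BEq κ] [LawfulBEq κ] (d : PySem.Dict κ ν) (a : κ) (v : ν) :
    (if d.contains a then d else d.insert a v).keys = PySem.Set.add d.keys a := by
  by_cases h : d.contains a = true
  · rw [if_pos (by simp [h]), PySem.Set.add_of_mem ((PySem.Dict.contains_iff_mem_keys d a).1 h)]
  · have hf : d.contains a = false := by simpa using h
    rw [if_neg (by simp [hf]), PySem.Dict.keys_insert_of_not_contains d v hf,
      PySem.Set.add_of_not_mem (fun hm => by simp [(PySem.Dict.contains_iff_mem_keys d a).2 hm] at hf)]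

theorem pvNodes_append_singleton (l : List (Int × Int)) (p : Int × Int) :
    pvNodes (l ++ [p]) = PySem.Set.add (PySem.Set.add (pvNodes l) p.1) p.2 := by
  simp only [pvNodes, List.flatMap_append, PySem.Set.ofList_append, List.flatMap_cons,
    List.flatMap_nil, List.append_nil, PySem.Set.update_cons, PySem.Set.update_nil]

theorem pvDeps_append_singleton (l : List (Int × Int)) (p : Int × Int) (w : Int) :
    pvDeps (l ++ [p]) w = pvDeps l w ++ (if p.2 = w then [p.1] else []) := by
  simp only [pvDeps, List.filter_append, List.map_append]
  congr 1
  by_cases h : p.2 = w <;> simp [List.filter_cons, h]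

theorem pvOuts_append_singleton (l : List (Int × Int)) (p : Int × Int) (v : Int) :
    pvOuts (l ++ [p]) v = pvOuts l v ++ (if p.1 = v then [p.2] else []) := by
  simp only [pvOuts, List.filter_append, List.map_append]
  congr 1
  by_cases h : p.1 = v <;> simp [List.filter_cons, h]

theorem pvKahnInit_spec (prereqs : List (Int × Int)) :
    (pvKahnInit prereqs).1.keys = pvNodes prereqs ∧
    (∀ w, (pvKahnInit prereqs).1.getD w 0 = ((pvDeps prereqs w).length : Int)) ∧
    (∀ v, (pvKahnInit prereqs).2.getD v [] = pvOuts prereqs v) := by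
  induction prereqs using List.reverseRecOn with
  | nil => exact ⟨rfl, fun w => rfl, fun v => rfl⟩
  | append_singleton l p ih =>
    obtain ⟨ihk, ihd, iha⟩ := ih
    have hstep : pvKahnInit (l ++ [p]) =
        (let st := pvKahnInit l
         let indeg := if st.1.contains p.1 then st.1 else st.1.insert p.1 0
         let indeg := if indeg.contains p.2 then indeg else indeg.insert p.2 0
         let adj := if st.2.contains p.1 then st.2 else st.2.insert p.1 []
         let adj := adj.modify p.1 [] (· ++ [p.2])
         (indeg.modify p.2 0 (· + 1), adj)) := by
      unfold pvKahnInit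
      rw [List.foldl_append, List.foldl_cons, List.foldl_nil]
    rw [hstep]
    refine ⟨?_, ?_, ?_⟩
    · show ((if _ then _ else _ : PySem.Dict Int Int).modify p.2 0 (· + 1)).keys = _
      have hkeys2 : (if (if (pvKahnInit l).1.contains p.1 then (pvKahnInit l).1
            else (pvKahnInit l).1.insert p.1 0).contains p.2
          then (if (pvKahnInit l).1.contains p.1 then (pvKahnInit l).1
            else (pvKahnInit l).1.insert p.1 0)
          else (if (pvKahnInit l).1.contains p.1 then (pvKahnInit l).1
            else (pvKahnInit l).1.insert p.1 0).insert p.2 0).keys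
          = PySem.Set.add (PySem.Set.add (pvKahnInit l).1.keys p.1) p.2 := by
        rw [pvKeys_insert_if, pvKeys_insert_if]
      show (PySem.Dict.insert _ p.2 _).keys = _
      rw [PySem.Dict.keys_insert_of_contains _ _ (by
        rw [PySem.Dict.contains_iff_mem_keys, hkeys2]
        exact (PySem.Set.mem_add _ _ _).2 (Or.inr rfl)), hkeys2, ihk, pvNodes_append_singleton]
    · intro w
      show ((if _ then _ else _ : PySem.Dict Int Int).modify p.2 0 (· + 1)).getD w 0 = _
      rw [PySem.Dict.getD_modify, pvDeps_append_singleton]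
      by_cases hw : w = p.2
      · rw [if_pos hw, hw, pvGetD_insert_if, pvGetD_insert_if, ihd p.2, if_pos rfl]
        simp
      · rw [if_neg hw, pvGetD_insert_if, pvGetD_insert_if, ihd w,
          if_neg (fun h => hw h.symm)]
        simp
    · intro v
      show ((if _ then _ else _ : PySem.Dict Int (List Int)).modify p.1 [] (· ++ [p.2])).getD v [] = _
      rw [PySem.Dict.getD_modify, pvOuts_append_singleton]
      by_cases hv : v = p.1
      · rw [if_pos hv, hv, pvGetD_insert_if, iha p.1, if_pos rfl]
      · rw [if_neg hv, pvGetD_insert_if, iha v, if_neg (fun h => hv h.symm)]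
        simp

theorem pvRound_fold (base : Int → Nat) :
    ∀ (ws u : List Int) (indeg : PySem.Dict Int Int) (nxt : List Int),
    (∀ w, indeg.getD w 0 = (base w : Int) - u.count w) →
    (∀ w, (u ++ ws).count w ≤ base w) →
    (∀ w, w ∈ nxt ↔ 0 < base w ∧ u.count w = base w) → nxt.Nodup →
    (∀ w, (ws.foldl (fun st w =>
        let indeg := st.1.modify w 0 (· - 1)
        if indeg.getD w 0 = 0 then (indeg, st.2 ++ [w]) else (indeg, st.2)) (indeg, nxt)).1.getD w 0
        = (base w : Int) - (u ++ ws).count w) ∧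
    (∀ w, w ∈ (ws.foldl (fun st w =>
        let indeg := st.1.modify w 0 (· - 1)
        if indeg.getD w 0 = 0 then (indeg, st.2 ++ [w]) else (indeg, st.2)) (indeg, nxt)).2
        ↔ 0 < base w ∧ (u ++ ws).count w = base w) ∧
    (ws.foldl (fun st w =>
        let indeg := st.1.modify w 0 (· - 1)
        if indeg.getD w 0 = 0 then (indeg, st.2 ++ [w]) else (indeg, st.2)) (indeg, nxt)).2.Nodup := by
  intro ws
  induction ws with
  | nil =>
    intro u indeg nxt h1 h2 h3 h4
    simp only [List.foldl_nil, List.append_nil]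
    exact ⟨h1, h3, h4⟩
  | cons w ws ih =>
    intro u indeg nxt h1 h2 h3 h4
    rw [List.foldl_cons]
    have hcw : (u ++ w :: ws).count w = u.count w + 1 + ws.count w := by
      simp [List.count_append, List.count_cons]; omega
    have hbw : u.count w + 1 ≤ base w := by have := h2 w; omega
    have hind1 : ∀ x, (indeg.modify w 0 (· - 1)).getD x 0 = (base x : Int) - (u ++ [w]).count x := by
      intro x
      rw [PySem.Dict.getD_modify]
      by_cases hx : x = w
      · subst hx
        rw [if_pos rfl, h1]
        simp [List.count_append]
        omega
      · rw [if_neg hx, h1]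
        have : ([w].count x) = 0 := by simp [List.count_singleton]; exact fun h => hx h.symm
        simp [List.count_append, this]
    have hcnt1 : ∀ x, ((u ++ [w]) ++ ws).count x ≤ base x := by
      intro x
      have := h2 x
      simpa [List.append_assoc] using this
    have hassoc : u ++ w :: ws = (u ++ [w]) ++ ws := by simp
    by_cases hz : (indeg.modify w 0 (· - 1)).getD w 0 = 0
    · have hbase : base w = u.count w + 1 := by
        have := hind1 w
        rw [hz] at this
        simp [List.count_append] at this
        omega
      have hwn : w ∉ nxt := by
        intro hw
        have := (h3 w).1 hw
        omega
      have hstep : (let indeg1 := (indeg, nxt).1.modify w 0 (· - 1)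
          if indeg1.getD w 0 = 0 then (indeg1, (indeg, nxt).2 ++ [w]) else (indeg1, (indeg, nxt).2))
          = (indeg.modify w 0 (· - 1), nxt ++ [w]) := by
        show (if _ then _ else _) = _
        rw [if_pos hz]
      rw [hstep, hassoc]
      refine ih (u ++ [w]) _ _ hind1 hcnt1 ?_ ?_
      · intro x
        by_cases hx : x = w
        · subst hx
          simp only [List.mem_append, List.mem_singleton, List.count_append,
            List.count_singleton]
          constructor
          · intro _
            refine ⟨by omega, by simp; omega⟩
          · intro _
            exact Or.inr (by simp)
        · have hcx : (u ++ [w]).count x = u.count x := by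
            have : ([w].count x) = 0 := by simp [List.count_singleton]; exact fun h => hx h.symm
            simp [List.count_append, this]
          rw [hcx]
          simp only [List.mem_append, List.mem_singleton]
          constructor
          · rintro (hx' | hx')
            · exact (h3 x).1 hx'
            · exact absurd hx' hx
          · intro hx'
            exact Or.inl ((h3 x).2 hx')
      · simp only [List.nodup_append, h4, true_and, List.nodup_singleton]
        intro a ha b hb hab
        rw [hab, List.mem_singleton.1 hb] at ha
        exact hwn ha
    · have hstep : (let indeg1 := (indeg, nxt).1.modify w 0 (· - 1)
          if indeg1.getD w 0 = 0 then (indeg1, (indeg, nxt).2 ++ [w]) else (indeg1, (indeg, nxt).2))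
          = (indeg.modify w 0 (· - 1), nxt) := by
        show (if _ then _ else _) = _
        rw [if_neg hz]
      have hbgt : u.count w + 1 < base w := by
        have h0 := hind1 w
        have : (base w : Int) - (u ++ [w]).count w ≠ 0 := fun hh => hz (by rw [h0, hh])
        simp [List.count_append] at this
        omega
      rw [hstep, hassoc]
      refine ih (u ++ [w]) _ _ hind1 hcnt1 ?_ h4
      intro x
      by_cases hx : x = w
      · subst hx
        simp only [List.count_append, List.count_singleton]
        constructor
        · intro hm
          have := (h3 x).1 hm
          omega
        · intro hm
          simp at hm
          omega
      · have : ([w].count x) = 0 := by simp [List.count_singleton]; exact fun h => hx h.symm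
        simp only [List.count_append, this, Nat.add_zero]
        exact h3 x

theorem mem_pvNodes_of_pvDeps_ne_nil {prereqs : List (Int × Int)} {w : Int}
    (h : pvDeps prereqs w ≠ []) : w ∈ pvNodes prereqs := by
  obtain ⟨a, ha⟩ := List.exists_mem_of_ne_nil _ h
  simp only [pvDeps, List.mem_map, List.mem_filter, beq_iff_eq] at ha
  obtain ⟨p, ⟨hp, hp2⟩, -⟩ := ha
  exact hp2 ▸ mem_pvNodes_tgt hp

theorem pvDone_succ_false {prereqs : List (Int × Int)} {k : Nat} {w : Int}
    (h : pvDone prereqs (k + 1) w = false) :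
    ∃ a ∈ pvDeps prereqs w, pvDone prereqs k a = false := by
  have := h
  simp only [pvDone, List.all_eq_false] at this
  obtain ⟨a, ha, hak⟩ := this
  exact ⟨a, ha, by simpa using hak⟩

theorem pvDone_succ_eq (prereqs : List (Int × Int)) (k : Nat) (v : Int) :
    pvDone prereqs (k + 1) v = (pvDeps prereqs v).all (fun a => pvDone prereqs k a) := rfl

theorem pvCountP_congr {α : Type} (l : List α) (p q : α → Bool) (h : ∀ a ∈ l, p a = q a) :
    l.countP p = l.countP q := by
  induction l with
  | nil => rfl
  | cons a l ih =>
    rw [List.countP_cons, List.countP_cons, h a (by simp), ih (fun x hx => h x (by simp [hx]))]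

theorem pvOuts_count (prereqs : List (Int × Int)) (v w : Int) :
    (pvOuts prereqs v).count w = (pvDeps prereqs w).countP (fun a => a == v) := by
  simp only [pvOuts, pvDeps, List.count, List.countP_map, List.countP_filter]
  exact pvCountP_congr _ _ _ (fun p _ => by
    cases h1 : (p.1 == v) <;> cases h2 : (p.2 == w) <;> simp [Function.comp, h1, h2])

theorem pvFlatMap_count (prereqs : List (Int × Int)) :
    ∀ (l : List Int), l.Nodup → ∀ w,
    (l.flatMap (fun v => pvOuts prereqs v)).count w
      = (pvDeps prereqs w).countP (fun a => decide (a ∈ l)) := by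
  intro l
  induction l with
  | nil => intro _ w; simp
  | cons v l ih =>
    intro hnd w
    have hvl : v ∉ l := (List.nodup_cons.1 hnd).1
    rw [List.flatMap_cons, List.count_append, pvOuts_count, ih (List.nodup_cons.1 hnd).2 w]
    have hcongr : (pvDeps prereqs w).countP (fun a => decide (a ∈ v :: l))
        = (pvDeps prereqs w).countP (fun a => (a == v) || decide (a ∈ l)) :=
      pvCountP_congr _ _ _ (fun a _ => by by_cases h : a = v <;> simp [h])
    rw [hcongr, pvCountP_or_disjoint _ _ _ (fun a _ ⟨h1, h2⟩ => by
      rw [beq_iff_eq] at h1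
      rw [h1] at h2
      exact hvl (by simpa using h2))]

theorem pvBase_split {prereqs : List (Int × Int)} {k : Nat} {frontier : List Int}
    (hfrmem : ∀ v, v ∈ frontier ↔ v ∈ pvNodes prereqs ∧ pvDone prereqs (k + 1) v = true
        ∧ pvDone prereqs k v = false) (w : Int) :
    pvBase prereqs k w = pvBase prereqs (k + 1) w
      + (pvDeps prereqs w).countP (fun a => decide (a ∈ frontier)) := by
  have h1 : pvBase prereqs k w = (pvDeps prereqs w).countP (fun a => !pvDone prereqs k a) :=
    List.countP_eq_length_filter.symm
  have h2 : pvBase prereqs (k + 1) w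
      = (pvDeps prereqs w).countP (fun a => !pvDone prereqs (k + 1) a) :=
    List.countP_eq_length_filter.symm
  rw [h1, h2]
  have hsplit : (pvDeps prereqs w).countP (fun a => !pvDone prereqs k a)
      = (pvDeps prereqs w).countP (fun a =>
          (!pvDone prereqs (k + 1) a) || (pvDone prereqs (k + 1) a && !pvDone prereqs k a)) := by
    refine pvCountP_congr _ _ _ (fun a _ => ?_)
    cases hk : pvDone prereqs k a
    · cases hk1 : pvDone prereqs (k + 1) a <;> simp
    · simp [pvDone_mono hk]
  rw [hsplit, pvCountP_or_disjoint _ _ _ (fun a _ h => by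
    obtain ⟨hp, hq⟩ := h
    simp at hp
    simp [hp] at hq)]
  congr 1
  refine pvCountP_congr _ _ _ (fun a ha => ?_)
  have haN := mem_pvNodes_of_mem_pvDeps ha
  by_cases hm : a ∈ frontier
  · obtain ⟨-, hd1, hd0⟩ := (hfrmem a).1 hm
    simp [hm, hd1, hd0]
  · have hfalse : decide (a ∈ frontier) = false := by simp [hm]
    rw [hfalse]
    cases hd1 : pvDone prereqs (k + 1) a
    · simp
    · cases hd0 : pvDone prereqs k a
      · exact absurd ((hfrmem a).2 ⟨haN, hd1, hd0⟩) hm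
      · simp

theorem pvKahnRound_spec {prereqs : List (Int × Int)} {adj k frontier indeg}
    (hadj : ∀ v, adj.getD v [] = pvOuts prereqs v)
    (hfr : pvFrInv prereqs k frontier)
    (hind : ∀ w, indeg.getD w 0 = (pvBase prereqs k w : Int)) :
    (∀ w, (pvKahnRound adj frontier indeg).1.getD w 0 = (pvBase prereqs (k + 1) w : Int)) ∧
    pvFrInv prereqs (k + 1) (pvKahnRound adj frontier indeg).2 := by
  obtain ⟨hfrnd, hfrmem⟩ := hfr
  have hflat : pvKahnRound adj frontier indeg
      = ((frontier.flatMap (fun v => pvOuts prereqs v)).foldl (fun st w =>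
          let indeg := st.1.modify w 0 (· - 1)
          if indeg.getD w 0 = 0 then (indeg, st.2 ++ [w]) else (indeg, st.2)) (indeg, [])) := by
    unfold pvKahnRound
    rw [pvFoldl_flatMap]
    exact congrArg (fun f => List.foldl _ (indeg, ([] : List Int)) (List.flatMap f frontier))
      (funext hadj)
  have hws : ∀ w, (frontier.flatMap (fun v => pvOuts prereqs v)).count w
      = (pvDeps prereqs w).countP (fun a => decide (a ∈ frontier)) :=
    pvFlatMap_count prereqs frontier hfrnd
  have hsplit := pvBase_split hfrmem
  obtain ⟨hr1, hr2, hr3⟩ := pvRound_fold (pvBase prereqs k)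
      (frontier.flatMap (fun v => pvOuts prereqs v)) [] indeg []
      (fun w => by rw [hind w]; simp)
      (fun w => by rw [List.nil_append, hws w, hsplit w]; omega)
      (fun w => by
        simp only [List.not_mem_nil, List.count_nil, false_iff]
        intro ⟨hpos, hcnt⟩
        omega)
      List.nodup_nil
  rw [hflat]
  have hbase_le : ∀ w, pvBase prereqs (k + 1) w ≤ pvBase prereqs k w := fun w => by
    have := hsplit w; omega
  have hcnt_eq : ∀ w, (frontier.flatMap (fun v => pvOuts prereqs v)).count w
      = pvBase prereqs k w - pvBase prereqs (k + 1) w := fun w => by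
    rw [hws w]; have := hsplit w; omega
  refine ⟨?_, hr3, ?_⟩
  · intro w
    rw [hr1 w, List.nil_append, hcnt_eq w]
    have := hbase_le w
    push_cast
    omega
  · intro w
    rw [hr2 w, List.nil_append, hcnt_eq w]
    constructor
    · intro ⟨hpos, hcnt⟩
      have hb1 : pvBase prereqs (k + 1) w = 0 := by omega
      have hfne : (pvDeps prereqs w).filter (fun a => !pvDone prereqs k a) ≠ [] := by
        intro hnil
        unfold pvBase at hpos
        rw [hnil] at hpos
        simp at hpos
      obtain ⟨a, ha⟩ := List.exists_mem_of_ne_nil _ hfne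
      rw [List.mem_filter] at ha
      obtain ⟨hamem, hak⟩ := ha
      have hdepsne : pvDeps prereqs w ≠ [] := fun h => by rw [h] at hamem; exact absurd hamem List.not_mem_nil
      refine ⟨mem_pvNodes_of_pvDeps_ne_nil hdepsne, ?_, ?_⟩
      · -- done (k+2) w from base (k+1) = 0
        have hf1 : (pvDeps prereqs w).filter (fun a => !pvDone prereqs (k + 1) a) = [] := by
          unfold pvBase at hb1
          exact List.eq_nil_of_length_eq_zero hb1
        have hall := List.filter_eq_nil_iff.1 hf1
        rw [pvDone_succ_eq, List.all_eq_true]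
        intro a' ha'
        have := hall a' ha'
        simpa using this
      · -- ¬ done (k+1) w
        cases hd : pvDone prereqs (k + 1) w
        · rfl
        · exfalso
          rw [pvDone_succ_eq, List.all_eq_true] at hd
          have := hd a hamem
          simp [this] at hak
    · intro ⟨hwN, hd2, hd1⟩
      obtain ⟨a, ha, hak⟩ := pvDone_succ_false hd1
      have hpos : 0 < pvBase prereqs k w := by
        unfold pvBase
        rw [List.length_pos_iff]
        intro hnil
        have := List.filter_eq_nil_iff.1 hnil a ha
        simp [hak] at this
      have hb1 : pvBase prereqs (k + 1) w = 0 := by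
        unfold pvBase
        rw [List.length_eq_zero_iff]
        rw [List.filter_eq_nil_iff]
        intro a' ha'
        rw [pvDone_succ_eq, List.all_eq_true] at hd2
        simp [hd2 a' ha']
      exact ⟨hpos, by omega⟩

theorem pvKahnLoop_eq {num_courses prereqs} (hP : Pre_semesters_required num_courses prereqs)
    {adj} (hadj : ∀ v, adj.getD v [] = pvOuts prereqs v) :
    ∀ (fuel k : Nat) (indeg : PySem.Dict Int Int) (frontier : List Int) (sems : Int),
    pvFrInv prereqs k frontier → (∀ w, indeg.getD w 0 = (pvBase prereqs k w : Int)) →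
    pvN hP ≤ k + fuel →
    pvKahnLoop adj fuel indeg frontier sems = sems + ((pvN hP - k : Nat) : Int) := by
  intro fuel
  induction fuel with
  | zero =>
    intro k indeg frontier sems hfr hind hle
    have : pvN hP - k = 0 := by omega
    rw [this]
    simp [pvKahnLoop]
  | succ fuel ih =>
    intro k indeg frontier sems hfr hind hle
    rw [pvKahnLoop]
    by_cases hemp : frontier = []
    · rw [if_pos hemp]
      have hk : pvN hP ≤ k := (pvFr_empty_iff hP hfr).1 hemp
      have : pvN hP - k = 0 := by omega
      rw [this]
      simp
    · rw [if_neg hemp]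
      have hklt : k < pvN hP := by
        by_contra hge
        exact hemp ((pvFr_empty_iff hP hfr).2 (by omega))
      obtain ⟨hind', hfr'⟩ := pvKahnRound_spec hadj hfr hind
      rw [ih (k + 1) _ _ (sems + 1) hfr' hind' (by omega)]
      have h1 : pvN hP - k = (pvN hP - (k + 1)) + 1 := by omega
      rw [h1]
      push_cast
      ring

theorem pvAlt_eq_pvN {num_courses prereqs} (hP : Pre_semesters_required num_courses prereqs) :
    semesters_required_alt num_courses prereqs = ((pvN hP : Nat) : Int) := by
  obtain ⟨hik, hid, hia⟩ := pvKahnInit_spec prereqs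
  have hnodupk : (pvKahnInit prereqs).1.keys.Nodup := by rw [hik]; exact nodup_pvNodes prereqs
  have hfr0 : pvFrInv prereqs 0
      ((pvKahnInit prereqs).1.keys.filter (fun v => (pvKahnInit prereqs).1.getD v 0 == 0)) := by
    refine ⟨hnodupk.filter _, fun v => ?_⟩
    rw [List.mem_filter, hik]
    constructor
    · intro ⟨hvN, hz⟩
      rw [hid v] at hz
      have hlen : (pvDeps prereqs v).length = 0 := by
        have := beq_iff_eq.1 hz
        exact_mod_cast this
      refine ⟨hvN, ?_, rfl⟩
      rw [pvDone_succ_eq, List.all_eq_true]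
      intro a ha
      rw [List.length_eq_zero_iff.1 hlen] at ha
      exact absurd ha List.not_mem_nil
    · rintro ⟨hvN, hd1, -⟩
      refine ⟨hvN, ?_⟩
      rw [hid v]
      rw [pvDone_succ_eq, List.all_eq_true] at hd1
      have : pvDeps prereqs v = [] := by
        rw [List.eq_nil_iff_forall_not_mem]
        intro a ha
        have := hd1 a ha
        simp [pvDone] at this
      rw [this]
      simp
  have hind0 : ∀ w, (pvKahnInit prereqs).1.getD w 0 = (pvBase prereqs 0 w : Int) := by
    intro w
    rw [hid w]
    unfold pvBase
    congr 1
    rw [show (fun a => !pvDone prereqs 0 a) = (fun _ : Int => true) from funext (fun a => by simp [pvDone])]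
    rw [List.filter_true]
  have hsize : (pvKahnInit prereqs).1.size = (pvNodes prereqs).length := by
    show (pvKahnInit prereqs).1.items.length = _
    rw [← hik]
    show _ = ((pvKahnInit prereqs).1.items.map (·.1)).length
    rw [List.length_map]
  have hfuel : pvN hP ≤ 0 + (pvKahnInit prereqs).1.size := by
    rw [hsize]
    have := pvN_le_card hP
    omega
  show pvKahnLoop (pvKahnInit prereqs).2 (pvKahnInit prereqs).1.size (pvKahnInit prereqs).1
      ((pvKahnInit prereqs).1.keys.filter (fun v => (pvKahnInit prereqs).1.getD v 0 == 0)) 0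
      = ((pvN hP : Nat) : Int)
  rw [pvKahnLoop_eq hP hia (pvKahnInit prereqs).1.size 0 _ _ 0 hfr0 hind0 hfuel]
  simp

-- ---- A side ----
def pvInvG (prereqs : List (Int × Int)) (j : Nat) (g : PySem.Dict Int (List Int)) : Prop :=
  g.keys.Nodup ∧
  (∀ v, g.contains v = true ↔ ((pvDeps prereqs v).filter (fun a => !pvDone prereqs j a)) ≠ []) ∧
  (∀ v, g.contains v = true → g.getD v [] = (pvDeps prereqs v).filter (fun a => !pvDone prereqs j a))

theorem pvFilter_map {α β : Type} (f : α → β) (p : β → Bool) (l : List α) :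
    (l.map f).filter p = (l.filter (fun x => p (f x))).map f := by
  induction l with
  | nil => rfl
  | cons a l ih => by_cases h : p (f a) <;> simp [List.filter_cons, h, ih]

theorem pvInsertIf_modify {κ : Type} [BEq κ] [LawfulBEq κ] [DecidableEq κ] (d : PySem.Dict κ (List κ)) (k : κ)
    (f : List κ → List κ) :
    (if d.contains k then d else d.insert k []).modify k [] f = d.modify k [] f := by
  by_cases h : d.contains k = true
  · rw [if_pos (by simp [h])]
  · have hf : d.contains k = false := by simpa using h
    rw [if_neg (by simp [hf])]
    show (d.insert k []).insert k (f ((d.insert k []).getD k [])) = d.insert k (f (d.getD k []))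
    rw [PySem.Dict.getD_insert, if_pos rfl, PySem.Dict.insert_insert_self,
      PySem.Dict.getD_of_not_contains d [] hf]

theorem pvDeps_ne_nil_iff (prereqs : List (Int × Int)) (v : Int) :
    pvDeps prereqs v ≠ [] ↔ v ∈ prereqs.map (·.2) := by
  rw [pvDeps]
  rw [Ne, List.map_eq_nil_iff]
  constructor
  · intro h
    obtain ⟨p, hp⟩ := List.exists_mem_of_ne_nil _ h
    rw [List.mem_filter] at hp
    exact List.mem_map.2 ⟨p, hp.1, (beq_iff_eq.1 hp.2)⟩
  · intro h hnil
    obtain ⟨p, hp, hpv⟩ := List.mem_map.1 h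
    have : p ∈ List.filter (fun p => p.2 == v) prereqs := List.mem_filter.2 ⟨hp, by simp [hpv]⟩
    rw [hnil] at this
    exact absurd this List.not_mem_nil

theorem pvFoldl_add2 (l : List (Int × Int)) :
    ∀ s : PySem.Set Int,
    l.foldl (fun s p => PySem.Set.add (PySem.Set.add s p.1) p.2) s
      = PySem.Set.update s (l.flatMap (fun p => [p.1, p.2])) := by
  induction l with
  | nil => intro s; rfl
  | cons p l ih =>
    intro s
    rw [List.foldl_cons, ih, List.flatMap_cons]
    show _ = PySem.Set.update s ([p.1, p.2] ++ _)
    rw [show ([p.1, p.2] ++ l.flatMap (fun p => [p.1, p.2]))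
        = p.1 :: p.2 :: l.flatMap (fun p => [p.1, p.2]) from rfl,
      PySem.Set.update_cons, PySem.Set.update_cons]

theorem pvBuildGraph_fst (prereqs : List (Int × Int)) :
    (pvBuildGraph prereqs).1
      = (prereqs.map (fun p => (p.2, p.1))).foldl
          (fun d q => d.modify q.1 [] (fun x => x ++ [q.2])) PySem.Dict.empty := by
  have hsplit : pvBuildGraph prereqs
      = (prereqs.foldl (fun d (p : Int × Int) =>
            (if d.contains p.2 then d else d.insert p.2 []).modify p.2 [] (fun x => x ++ [p.1]))
          PySem.Dict.empty,
        prereqs.foldl (fun s (p : Int × Int) => PySem.Set.add (PySem.Set.add s p.1) p.2) []) := by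
    unfold pvBuildGraph
    exact PySem.List.foldl_prod_mk
        (fun d (p : Int × Int) =>
          (if d.contains p.2 then d else d.insert p.2 []).modify p.2 [] (fun x => x ++ [p.1]))
        (fun s (p : Int × Int) => PySem.Set.add (PySem.Set.add s p.1) p.2)
        prereqs PySem.Dict.empty PySem.Set.empty
  rw [hsplit]
  show prereqs.foldl _ _ = _
  rw [PySem.List.foldl_congr_mem prereqs _
    (fun d (p : Int × Int) => d.modify p.2 [] (fun x => x ++ [p.1])) PySem.Dict.empty
    (fun acc x _ => pvInsertIf_modify acc x.2 _), List.foldl_map]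

theorem pvBuildGraph_spec (prereqs : List (Int × Int)) :
    (pvBuildGraph prereqs).2 = pvNodes prereqs ∧
    pvInvG prereqs 0 (pvBuildGraph prereqs).1 := by
  have hfilter0 : ∀ l : List Int, l.filter (fun a => !pvDone prereqs 0 a) = l := by
    intro l
    rw [show (fun a => !pvDone prereqs 0 a) = (fun _ : Int => true) from
      funext (fun a => by simp [pvDone]), List.filter_true]
  have hgetD : ∀ v, (pvBuildGraph prereqs).1.getD v [] = pvDeps prereqs v := by
    intro v
    rw [pvBuildGraph_fst, PySem.Dict.getD_foldl_modify_append]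
    rw [pvFilter_map (fun p : Int × Int => (p.2, p.1)) (fun q => q.1 == v) prereqs]
    simp only [PySem.Dict.getD_empty, List.nil_append, pvDeps]
    rw [List.map_map]
    rfl
  have hkeys : (pvBuildGraph prereqs).1.keys = PySem.Set.ofList (prereqs.map (·.2)) := by
    rw [pvBuildGraph_fst, PySem.Dict.keys_foldl_modify_key]
    rw [List.map_map]
    show PySem.Set.update PySem.Dict.empty.keys (prereqs.map (·.2)) = _
    rw [show (PySem.Dict.empty : PySem.Dict Int (List Int)).keys = [] from rfl,
      PySem.Set.update_nil_left]
  constructor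
  · have hsplit : pvBuildGraph prereqs
        = (prereqs.foldl (fun d (p : Int × Int) =>
              (if d.contains p.2 then d else d.insert p.2 []).modify p.2 [] (fun x => x ++ [p.1]))
            PySem.Dict.empty,
          prereqs.foldl (fun s (p : Int × Int) => PySem.Set.add (PySem.Set.add s p.1) p.2) []) := by
      unfold pvBuildGraph
      exact PySem.List.foldl_prod_mk
        (fun d (p : Int × Int) =>
          (if d.contains p.2 then d else d.insert p.2 []).modify p.2 [] (fun x => x ++ [p.1]))
        (fun s (p : Int × Int) => PySem.Set.add (PySem.Set.add s p.1) p.2)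
        prereqs PySem.Dict.empty PySem.Set.empty
    rw [hsplit]
    show prereqs.foldl (fun s (p : Int × Int) => PySem.Set.add (PySem.Set.add s p.1) p.2) [] = _
    rw [pvFoldl_add2, PySem.Set.update_nil_left]
    rfl
  · refine ⟨?_, ?_, ?_⟩
    · rw [hkeys]
      exact PySem.Set.nodup_ofList _
    · intro v
      rw [hfilter0, PySem.Dict.contains_iff_mem_keys, hkeys, pvDeps_ne_nil_iff]
      rw [PySem.Set.mem_ofList]
    · intro v _
      rw [hfilter0, hgetD]

theorem pvPassKey_fold (completed : PySem.Set Int) (key : Int) :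
    ∀ (l : List Int) (g : PySem.Dict Int (List Int)) (pre : List Int),
    g.keys.Nodup → g.contains key = true → g.getD key [] = pre ++ l →
    (∀ x ∈ pre, PySem.Set.contains completed x = false) → pre ++ l ≠ [] →
    l.foldl (fun g2 prereq =>
      let g3 := if PySem.Set.contains completed prereq then
          (match PySem.List.remove? (g2.getD key []) prereq with
           | some l => g2.insert key l
           | none => g2)
        else g2
      if (g3.getD key []).length = 0 then g3.erase key else g3) g =
      (if pre ++ l.filter (fun a => !PySem.Set.contains completed a) = []
       then (g.insert key []).erase key
       else g.insert key (pre ++ l.filter (fun a => !PySem.Set.contains completed a))) := by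
  intro l
  induction l with
  | nil =>
    intro g pre hnd hcon hget hpre hne
    rw [List.foldl_nil, List.filter_nil, List.append_nil]
    rw [List.append_nil] at hget hne
    rw [if_neg hne, ← hget, pvInsert_getD_self g key [] hcon hnd]
  | cons x l ih =>
    intro g pre hnd hcon hget hpre hne
    rw [List.foldl_cons]
    by_cases hp : PySem.Set.contains completed x = true
    · -- x is completed: it is removed from the stored list
      have hxpre : x ∉ pre := fun hx => by rw [hpre x hx] at hp; exact Bool.false_ne_true hp
      have hrem : PySem.List.remove? (g.getD key []) x = some (pre ++ l) := by
        rw [hget]; exact pvRemove?_append_cons pre l x hxpre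
      have hstep : (let g3 := if PySem.Set.contains completed x then
            (match PySem.List.remove? (g.getD key []) x with
             | some l => g.insert key l
             | none => g)
          else g
          if (g3.getD key []).length = 0 then g3.erase key else g3)
          = (if ((g.insert key (pre ++ l)).getD key []).length = 0
             then (g.insert key (pre ++ l)).erase key else g.insert key (pre ++ l)) := by
        show (if (PySem.Dict.getD (if PySem.Set.contains completed x = true then _ else _) key []).length = 0
            then _ else _) = _
        rw [if_pos hp, hrem]
      rw [hstep, PySem.Dict.getD_insert_self]
      have hpm : x ∈ completed := (PySem.Set.contains_iff completed x).1 hp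
      by_cases hnil : pre ++ l = []
      · -- the stored list became empty: the key is deleted, and l ends here
        obtain ⟨hpre0, hl0⟩ := List.append_eq_nil_iff.1 hnil
        subst hpre0; subst hl0
        simp [hpm]
      · rw [if_neg (by simpa using hnil), List.filter_cons_of_neg (by simp [hpm])]
        have h1 := ih (g.insert key (pre ++ l)) pre
          (PySem.Dict.nodup_keys_insert g key _ hnd)
          (PySem.Dict.contains_insert_self g key _)
          (PySem.Dict.getD_insert_self g key _ [])
          hpre (by simpa using hnil)
        rw [h1, PySem.Dict.insert_insert_self, PySem.Dict.insert_insert_self]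
    · -- x not completed: nothing happens this step
      have hpf : PySem.Set.contains completed x = false := by simpa using hp
      have hxm : x ∉ completed := fun hm => by
        rw [(PySem.Set.contains_iff completed x).2 hm] at hpf
        exact absurd hpf (by simp)
      have hstep : (let g3 := if PySem.Set.contains completed x then
            (match PySem.List.remove? (g.getD key []) x with
             | some l => g.insert key l
             | none => g)
          else g
          if (g3.getD key []).length = 0 then g3.erase key else g3) = g := by
        show (if (PySem.Dict.getD (if PySem.Set.contains completed x = true then _ else _) key []).length = 0
            then _ else _) = _
        rw [if_neg hp, hget]
        exact if_neg (by simp [List.length_eq_zero_iff])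
      rw [hstep]
      have h1 := ih g (pre ++ [x]) hnd hcon (by rw [hget]; simp)
        (fun y hy => by
          rcases List.mem_append.1 hy with hy1 | hy2
          · exact hpre y hy1
          · rw [List.mem_singleton.1 hy2]; exact hpf)
        (by simp)
      rw [h1, List.filter_cons_of_pos (by simp only [hpf, Bool.not_false])]
      rw [if_neg (by simp), if_neg (by simp)]
      rw [List.append_assoc]
      rfl

theorem pvPassKey_spec (completed : PySem.Set Int) (key : Int) (g : PySem.Dict Int (List Int))
    (hnd : g.keys.Nodup) (hcon : g.contains key = true) (hne : g.getD key [] ≠ []) :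
    pvPassKey completed key g =
      (if (g.getD key []).filter (fun a => !PySem.Set.contains completed a) = []
       then (g.insert key []).erase key
       else g.insert key ((g.getD key []).filter (fun a => !PySem.Set.contains completed a))) := by
  have h := pvPassKey_fold completed key (g.getD key []) g [] hnd hcon rfl
    (fun x hx => absurd hx List.not_mem_nil) (by simpa using hne)
  rw [List.nil_append] at h
  unfold pvPassKey
  exact h

theorem pvPass_fold (completed : PySem.Set Int) (p : Int → Bool)
    (hp : ∀ a, PySem.Set.contains completed a = p a) :
    ∀ (K : List Int) (g : PySem.Dict Int (List Int)), K.Nodup → g.keys.Nodup →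
    (∀ key ∈ K, g.contains key = true ∧ g.getD key [] ≠ []) →
    (K.foldl (fun g key => pvPassKey completed key g) g).keys.Nodup ∧
    (∀ v, v ∈ K →
      (K.foldl (fun g key => pvPassKey completed key g) g).contains v
          = !((g.getD v []).filter (fun a => !p a)).isEmpty ∧
      (K.foldl (fun g key => pvPassKey completed key g) g).getD v []
          = (g.getD v []).filter (fun a => !p a)) ∧
    (∀ v, v ∉ K →
      (K.foldl (fun g key => pvPassKey completed key g) g).contains v = g.contains v ∧
      (K.foldl (fun g key => pvPassKey completed key g) g).getD v [] = g.getD v []) := by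
  have hfun : (fun a => !PySem.Set.contains completed a) = (fun a => !p a) :=
    funext (fun a => by rw [hp a])
  intro K
  induction K with
  | nil =>
    intro g _ hnd _
    refine ⟨hnd, fun v hv => absurd hv List.not_mem_nil, fun v _ => ⟨rfl, rfl⟩⟩
  | cons key K ih =>
    intro g hKnd hnd hK
    have hkeyK : key ∉ K := (List.nodup_cons.1 hKnd).1
    obtain ⟨hcon, hne⟩ := hK key (by simp)
    have hspec := pvPassKey_spec completed key g hnd hcon hne
    rw [hfun] at hspec
    set flt := (g.getD key []).filter (fun a => !p a) with hflt
    have f1 : (pvPassKey completed key g).keys.Nodup := by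
      rw [hspec]
      by_cases h : flt = []
      · rw [if_pos h]
        exact pvNodup_keys_erase _ _ (PySem.Dict.nodup_keys_insert g key _ hnd)
      · rw [if_neg h]
        exact PySem.Dict.nodup_keys_insert g key _ hnd
    have f2 : (pvPassKey completed key g).getD key [] = flt := by
      rw [hspec]
      by_cases h : flt = []
      · rw [if_pos h, h]
        exact PySem.Dict.getD_of_not_contains _ _ (pvContains_erase_self _ key)
      · rw [if_neg h]
        exact PySem.Dict.getD_insert_self _ key _ []
    have f3 : (pvPassKey completed key g).contains key = !flt.isEmpty := by
      rw [hspec]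
      by_cases h : flt = []
      · rw [if_pos h, h, pvContains_erase_self]
        rfl
      · rw [if_neg h, PySem.Dict.contains_insert_self]
        cases hfe : flt with
        | nil => exact absurd hfe h
        | cons a t => rfl
    have f4 : ∀ v, v ≠ key → (pvPassKey completed key g).contains v = g.contains v ∧
        (pvPassKey completed key g).getD v [] = g.getD v [] := by
      intro v hv
      rw [hspec]
      by_cases h : flt = []
      · rw [if_pos h]
        constructor
        · rw [pvContains_erase_of_ne _ key v hv, PySem.Dict.contains_insert]
          simp [hv]
        · rw [pvGetD_erase_of_ne _ key v hv [], PySem.Dict.getD_insert, if_neg hv]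
      · rw [if_neg h]
        constructor
        · rw [PySem.Dict.contains_insert]
          simp [hv]
        · rw [PySem.Dict.getD_insert, if_neg hv]
    rw [List.foldl_cons]
    obtain ⟨ih1, ih2, ih3⟩ := ih (pvPassKey completed key g) (List.nodup_cons.1 hKnd).2 f1
      (fun k' hk' => by
        have hkne : k' ≠ key := fun hkk => hkeyK (hkk ▸ hk')
        obtain ⟨hc, hg⟩ := f4 k' hkne
        obtain ⟨hc', hg'⟩ := hK k' (by simp [hk'])
        exact ⟨by rw [hc]; exact hc', by rw [hg]; exact hg'⟩)
    refine ⟨ih1, ?_, ?_⟩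
    · intro v hv
      rcases List.mem_cons.1 hv with hveq | hvK
      · subst hveq
        obtain ⟨hc, hg⟩ := ih3 v hkeyK
        exact ⟨by rw [hc, f3], by rw [hg, f2]⟩
      · have hvne : v ≠ key := fun hkk => hkeyK (hkk ▸ hvK)
        obtain ⟨hc, hg⟩ := ih2 v hvK
        obtain ⟨-, hg4⟩ := f4 v hvne
        exact ⟨by rw [hc, hg4], by rw [hg, hg4]⟩
    · intro v hv
      have hvne : v ≠ key := fun hkk => hv (by simp [hkk])
      have hvK : v ∉ K := fun hk => hv (by simp [hk])
      obtain ⟨hc, hg⟩ := ih3 v hvK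
      obtain ⟨hc4, hg4⟩ := f4 v hvne
      exact ⟨by rw [hc, hc4], by rw [hg, hg4]⟩

theorem pvPass_spec {prereqs : List (Int × Int)} {j k : Nat} {g completed}
    (hjk : j ≤ k) (hg : pvInvG prereqs j g)
    (hcomp : ∀ a, PySem.Set.contains completed a
        = (decide (a ∈ pvNodes prereqs) && pvDone prereqs k a)) :
    pvInvG prereqs k (pvPass completed g) := by
  obtain ⟨hnd, hcont, hgetd⟩ := hg
  obtain ⟨P1, P2, P3⟩ := pvPass_fold completed
    (fun a => decide (a ∈ pvNodes prereqs) && pvDone prereqs k a) hcomp g.keys g hnd hnd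
    (fun key hkey => by
      have hc := (PySem.Dict.contains_iff_mem_keys g key).2 hkey
      refine ⟨hc, ?_⟩
      rw [hgetd key hc]
      exact (hcont key).1 hc)
  have hstored : ∀ v, g.contains v = true →
      (g.getD v []).filter (fun a => !(decide (a ∈ pvNodes prereqs) && pvDone prereqs k a))
        = (pvDeps prereqs v).filter (fun a => !pvDone prereqs k a) := by
    intro v hc
    rw [hgetd v hc]
    have hcg : ∀ a ∈ (pvDeps prereqs v).filter (fun a => !pvDone prereqs j a),
        (!(decide (a ∈ pvNodes prereqs) && pvDone prereqs k a)) = (!pvDone prereqs k a) := by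
      intro a ha
      have haN : a ∈ pvNodes prereqs := mem_pvNodes_of_mem_pvDeps (List.mem_filter.1 ha).1
      simp [haN]
    rw [List.filter_congr hcg, pvFilter_level hjk]
  have hpv : pvPass completed g = g.keys.foldl (fun g key => pvPassKey completed key g) g := rfl
  have hfe : ∀ l : List Int, ((!l.isEmpty) = true ↔ l ≠ []) := fun l => by cases l <;> simp
  refine ⟨by rw [hpv]; exact P1, ?_, ?_⟩
  · intro v
    rw [hpv]
    by_cases hv : v ∈ g.keys
    · rw [(P2 v hv).1, hstored v ((PySem.Dict.contains_iff_mem_keys g v).2 hv)]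
      exact hfe _
    · obtain ⟨hc, -⟩ := P3 v hv
      rw [hc]
      have hgc : g.contains v = false := by
        cases hgc : g.contains v
        · rfl
        · exact absurd ((PySem.Dict.contains_iff_mem_keys g v).1 hgc) hv
      have hj0 : (pvDeps prereqs v).filter (fun a => !pvDone prereqs j a) = [] := by
        cases hfj : (pvDeps prereqs v).filter (fun a => !pvDone prereqs j a)
        · rfl
        · exact absurd ((hcont v).2 (by rw [hfj]; simp)) (by simp [hgc])
      have hk0 : (pvDeps prereqs v).filter (fun a => !pvDone prereqs k a) = [] := by
        rw [← pvFilter_level hjk, hj0]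
        rfl
      rw [hgc, hk0]
      simp
  · intro v hvc
    rw [hpv] at hvc ⊢
    by_cases hv : v ∈ g.keys
    · rw [(P2 v hv).2, hstored v ((PySem.Dict.contains_iff_mem_keys g v).2 hv)]
    · obtain ⟨hc, -⟩ := P3 v hv
      rw [hc] at hvc
      exact absurd ((PySem.Dict.contains_iff_mem_keys g v).1 hvc) hv

theorem pvLoopA_eq {num_courses prereqs} (hP : Pre_semesters_required num_courses prereqs) :
    ∀ (fuel k j : Nat) (g : PySem.Dict Int (List Int)) (courses completed : PySem.Set Int)
      (sems : Int),
    j ≤ k → pvInvG prereqs j g → courses = pvRem prereqs k →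
    (∀ v, v ∈ completed ↔ v ∈ pvNodes prereqs ∧ pvDone prereqs k v = true) → completed.Nodup →
    pvN hP ≤ k + fuel →
    pvLoopA fuel g courses completed sems = sems + ((pvN hP - k : Nat) : Int) := by
  intro fuel
  induction fuel with
  | zero =>
    intro k j g courses completed sems hjk hg hcourses hmem hcnd hle
    have h0 : pvN hP - k = 0 := by omega
    rw [h0]
    simp [pvLoopA]
  | succ fuel ih =>
    intro k j g courses completed sems hjk hg hcourses hmem hcnd hle
    rw [pvLoopA]
    by_cases hc : courses = []
    · rw [if_pos hc]
      have hk : pvN hP ≤ k := (pvRem_eq_nil_iff hP k).1 (hcourses ▸ hc)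
      have h0 : pvN hP - k = 0 := by omega
      rw [h0]
      simp
    · rw [if_neg hc]
      have hklt : k < pvN hP := by
        by_contra hge
        exact hc (by rw [hcourses]; exact (pvRem_eq_nil_iff hP k).2 (by omega))
      -- completed's membership as a boolean characterisation
      have hcomp : ∀ a, PySem.Set.contains completed a
          = (decide (a ∈ pvNodes prereqs) && pvDone prereqs k a) := by
        intro a
        cases hca : PySem.Set.contains completed a
        · have ham : a ∉ completed := fun hm => by
            rw [(PySem.Set.contains_iff completed a).2 hm] at hca
            exact absurd hca (by simp)
          by_cases hN : a ∈ pvNodes prereqs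
          · cases hdk : pvDone prereqs k a
            · simp [hN, hdk]
            · exact absurd ((hmem a).2 ⟨hN, hdk⟩) ham
          · simp [hN]
        · obtain ⟨hN, hdk⟩ := (hmem a).1 ((PySem.Set.contains_iff completed a).1 hca)
          simp [hN, hdk]
      have hInvG' : pvInvG prereqs k (pvPass completed g) := pvPass_spec hjk hg hcomp
      obtain ⟨hnd', hcont', hgetd'⟩ := hInvG'
      have hcoursesnd : courses.Nodup := by
        rw [hcourses]
        exact (nodup_pvNodes prereqs).filter _
      -- the current semester, as a filter
      have hcsfold : courses.foldl
            (fun s c => if (pvPass completed g).contains c then s else PySem.Set.add s c)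
            PySem.Set.empty
          = courses.filter (fun c => !(pvPass completed g).contains c) := by
        rw [PySem.List.foldl_congr_mem courses _
            (fun s c => if (!(pvPass completed g).contains c) = true then PySem.Set.add s c else s)
            PySem.Set.empty
            (fun acc x _ => by cases hcx : (pvPass completed g).contains x <;> simp [hcx]),
          PySem.List.foldl_if_eq_foldl_filter,
          show (PySem.Set.empty : PySem.Set Int) = [] from rfl, ← PySem.Set.ofList_eq_foldl,
          PySem.Set.ofList_eq_self_of_nodup _ (hcoursesnd.filter _)]
      have hcs2 : courses.filter (fun c => !(pvPass completed g).contains c)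
          = (pvRem prereqs k).filter (fun v => pvDone prereqs (k + 1) v) := by
        rw [hcourses]
        refine List.filter_congr (fun v _ => ?_)
        cases hcv : (pvPass completed g).contains v
        · have hfk : (pvDeps prereqs v).filter (fun a => !pvDone prereqs k a) = [] := by
            cases hfk : (pvDeps prereqs v).filter (fun a => !pvDone prereqs k a) with
            | nil => rfl
            | cons a t =>
              exact absurd ((hcont' v).2 (by rw [hfk]; simp)) (by simp [hcv])
          have hdone : pvDone prereqs (k + 1) v = true := by
            rw [pvDone_succ_eq, List.all_eq_true]
            intro a ha
            have := List.filter_eq_nil_iff.1 hfk a ha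
            simpa using this
          simp [hdone]
        · have hne := (hcont' v).1 hcv
          obtain ⟨a, ha⟩ := List.exists_mem_of_ne_nil _ hne
          rw [List.mem_filter] at ha
          have hdone : pvDone prereqs (k + 1) v = false := by
            cases hd : pvDone prereqs (k + 1) v
            · rfl
            · rw [pvDone_succ_eq, List.all_eq_true] at hd
              have := hd a ha.1
              rw [this] at ha
              exact absurd ha.2 (by simp)
          simp [hdone]
      -- next semester's courses
      have hcourses' : (courses.filter (fun c => !(pvPass completed g).contains c)).foldl
            (fun cs c => PySem.Set.discard cs c) courses = pvRem prereqs (k + 1) := by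
        rw [pvFoldl_discard, hcs2, hcourses, pvRem_succ]
        refine List.filter_congr (fun v hv => ?_)
        cases hd : pvDone prereqs (k + 1) v
        · have hnm : v ∉ (pvRem prereqs k).filter (fun v => pvDone prereqs (k + 1) v) := by
            intro hm
            rw [List.mem_filter, hd] at hm
            exact absurd hm.2 (by simp)
          simp [hnm]
        · have hm : v ∈ (pvRem prereqs k).filter (fun v => pvDone prereqs (k + 1) v) :=
            List.mem_filter.2 ⟨hv, by simp [hd]⟩
          simp [hm]
      show pvLoopA fuel (pvPass completed g)
          (List.foldl (fun cs c => PySem.Set.discard cs c) courses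
            (List.foldl (fun s c => if (pvPass completed g).contains c then s else PySem.Set.add s c)
              PySem.Set.empty courses))
          (List.foldl (fun cp c => PySem.Set.add cp c) completed
            (List.foldl (fun s c => if (pvPass completed g).contains c then s else PySem.Set.add s c)
              PySem.Set.empty courses))
          (sems + 1) = sems + ((pvN hP - k : Nat) : Int)
      rw [hcsfold, hcourses']
      -- completed after this semester
      have hcompleted' : ∀ v,
          v ∈ (courses.filter (fun c => !(pvPass completed g).contains c)).foldl
              (fun cp c => PySem.Set.add cp c) completed
            ↔ v ∈ pvNodes prereqs ∧ pvDone prereqs (k + 1) v = true := by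
        intro v
        have hupd : (courses.filter (fun c => !(pvPass completed g).contains c)).foldl
            (fun cp c => PySem.Set.add cp c) completed
            = PySem.Set.update completed (courses.filter (fun c => !(pvPass completed g).contains c)) := rfl
        rw [hupd, PySem.Set.mem_update, hcs2]
        constructor
        · rintro (hv | hv)
          · obtain ⟨hN, hdk⟩ := (hmem v).1 hv
            exact ⟨hN, pvDone_mono hdk⟩
          · rw [List.mem_filter] at hv
            obtain ⟨hvrem, hd1⟩ := hv
            rw [pvRem, List.mem_filter] at hvrem
            exact ⟨hvrem.1, hd1⟩
        · rintro ⟨hN, hd1⟩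
          cases hdk : pvDone prereqs k v
          · right
            exact List.mem_filter.2 ⟨by rw [pvRem, List.mem_filter]; exact ⟨hN, by simp [hdk]⟩, hd1⟩
          · left
            exact (hmem v).2 ⟨hN, hdk⟩
      have hcnd' : ((courses.filter (fun c => !(pvPass completed g).contains c)).foldl
          (fun cp c => PySem.Set.add cp c) completed).Nodup := by
        have hupd : (courses.filter (fun c => !(pvPass completed g).contains c)).foldl
            (fun cp c => PySem.Set.add cp c) completed
            = PySem.Set.update completed (courses.filter (fun c => !(pvPass completed g).contains c)) := rfl
        rw [hupd]
        exact PySem.Set.nodup_update completed _ hcnd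
      rw [ih (k + 1) k (pvPass completed g) _ _ (sems + 1) (by omega)
        ⟨hnd', hcont', hgetd'⟩ rfl hcompleted' hcnd' (by omega)]
      have h1 : pvN hP - k = (pvN hP - (k + 1)) + 1 := by omega
      rw [h1]
      push_cast
      ring

theorem pvA_eq_pvN {num_courses prereqs} (hP : Pre_semesters_required num_courses prereqs) :
    semesters_required num_courses prereqs = ((pvN hP : Nat) : Int) := by
  obtain ⟨hsnd, hinv⟩ := pvBuildGraph_spec prereqs
  show pvLoopA (pvBuildGraph prereqs).2.length (pvBuildGraph prereqs).1 (pvBuildGraph prereqs).2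
      PySem.Set.empty 0 = ((pvN hP : Nat) : Int)
  rw [hsnd]
  rw [pvLoopA_eq hP (pvNodes prereqs).length 0 0 (pvBuildGraph prereqs).1 (pvNodes prereqs)
    PySem.Set.empty 0 (Nat.le_refl 0) hinv (pvRem_zero prereqs).symm
    (fun v => by
      constructor
      · intro hv
        exact absurd hv List.not_mem_nil
      · rintro ⟨-, hd⟩
        simp [pvDone] at hd)
    List.nodup_nil
    (by have := pvN_le_card hP; omega)]
  simp

-- ===== VERDICT (by name: the statement is the Claim_ definition above) =====
theorem semesters_required_spec : Claim_equal_semesters_required := by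
  intro num_courses prereqs _ hP
  unfold Spec_semesters_required
  rw [pvA_eq_pvN hP, pvAlt_eq_pvN hP]
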